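-- pv_equiv track=rewrite | github.com/AnnaLeah02/Intro-to-Programming-Projects | data_utils.py | grade_counts
-- ===== SOURCE A (Python) =====
-- def grade_counts(grades: list[str]) -> dict[str, int]:
--     """Counts the occurence of each grade in a list of grades."""
--     counts: dict[str, int] = {}
--     for character in grades:
--         if character in counts:
--             counts[character] += 1
--         else:
--             counts[character] = 1
--     return counts
-- ===== SOURCE B (Python) =====
-- def grade_counts(grades: list[str]) -> dict[str, int]:
--     """Counts the occurence of each grade in a list of grades."""
--     return {g: grades.count(g) for g in dict.fromkeys(grades)}
-- ===== Notes on version B (the rewrite author's own statement) =====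
-- stated objective: idiomatic
-- what changed: Replaces the one-pass dict-update loop by ordered dedup of the keys (dict.fromkeys) plus a per-key list.count comprehension.
import Mathlib
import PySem

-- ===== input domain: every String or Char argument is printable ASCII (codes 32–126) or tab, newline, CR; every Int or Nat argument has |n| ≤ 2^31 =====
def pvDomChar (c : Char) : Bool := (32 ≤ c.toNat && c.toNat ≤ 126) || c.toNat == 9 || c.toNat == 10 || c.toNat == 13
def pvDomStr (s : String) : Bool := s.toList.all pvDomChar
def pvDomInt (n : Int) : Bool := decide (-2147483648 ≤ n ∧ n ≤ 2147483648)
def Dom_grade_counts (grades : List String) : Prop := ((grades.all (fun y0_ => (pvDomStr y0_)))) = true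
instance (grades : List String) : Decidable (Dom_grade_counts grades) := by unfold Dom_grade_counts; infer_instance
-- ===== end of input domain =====

-- ===== PORT A =====
-- B replaces A's one-pass dict-update loop with ordered dedup + per-key count (idiomatic, same results).
def grade_counts (grades : List String) : List (String × Int) :=
  (grades.foldl
    (fun counts character =>
      if counts.contains character then
        counts.insert character (counts.getD character 0 + 1)
      else
        counts.insert character 1)
    PySem.Dict.empty).items

-- ===== PORT B =====
def grade_counts_alt (grades : List String) : List (String × Int) :=
  (PySem.List.dedup grades).map (fun g => (g, (grades.count g : Int)))

-- ===== PRECONDITION & SPEC =====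
def Spec_grade_counts (grades : List String) (out : List (String × Int)) : Prop := out = grade_counts_alt grades
instance (grades : List String) (out : List (String × Int)) : Decidable (Spec_grade_counts grades out) := by unfold Spec_grade_counts; infer_instance

-- ===== CLAIM (what is proved, stated in full; the proofs are below) =====
def Claim_equal_grade_counts : Prop := ∀ (grades : List String), Dom_grade_counts grades → Spec_grade_counts grades (grade_counts grades)

-- ===== LEMMAS AND PROOFS =====

-- ===== VERDICT (by name: the statement is the Claim_ definition above) =====
theorem loop_eq_counter (grades : List String) :
    grades.foldl
      (fun counts character =>
        if counts.contains character then
          counts.insert character (counts.getD character 0 + 1)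
        else
          counts.insert character 1)
      PySem.Dict.empty = PySem.Dict.counter grades := by
  rw [← PySem.Dict.foldl_insert_getD_add_one_eq_counter]
  congr 1
  funext d c
  split
  · rfl
  · rename_i h
    have h0 : d.getD c (0 : Int) = 0 := by
      apply PySem.Dict.getD_of_not_contains
      simpa using h
    rw [h0]; norm_num

theorem grade_counts_spec : Claim_equal_grade_counts := by
  intro grades _
  unfold Spec_grade_counts grade_counts grade_counts_alt
  rw [loop_eq_counter, PySem.Dict.items_counter, PySem.List.dedup_eq_ofList]
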